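-- pv_equiv track=rewrite | github.com/sumnerevans/advent-of-code | 2020/24.py | grid_adjs
-- ===== SOURCE A (Python) =====
-- import itertools as it
-- from typing import (
--     Dict,
--     Generator,
--     Iterable,
--     List,
--     Match,
--     Optional,
--     Set,
--     Sized,
--     Tuple,
--     TypeVar,
--     Union,
-- )
--
-- def grid_adjs(
--     coord: Tuple[int, ...],
--     bounds: Tuple[Tuple[int, int], ...] = None,
--     inclusive: bool = True,
-- ) -> Generator[Tuple[int, ...], None, None]:
--     # Iterate through all of the deltas for the N dimensions of the coord. A delta is
--     # -1, 0, or 1 indicating that the adjacent cell is one lower, same level, or higher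
--     # than the given coordinate.
--     for delta in it.product((-1, 0, 1), repeat=len(coord)):
--         if all(d == 0 for d in delta):
--             # This is the coord itself, skip.
--             continue
--
--         # Check the bounds
--         if bounds is not None:
--             inbounds = True
--             for i, (d, (low, high)) in enumerate(zip(delta, bounds)):
--                 if inclusive and not (low <= coord[i] + d <= high):
--                     inbounds = False
--                     break
--                 elif not inclusive and not (low < coord[i] + d < high):
--                     inbounds = False
--                     break
--             if not inbounds:
--                 continue
--
--         yield tuple(c + d for c, d in zip(coord, delta))
-- ===== SOURCE B (Python) =====
-- import itertools as it
--
--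
-- def _dim_vals(c, b, inclusive):
--     vals = (c - 1, c, c + 1)
--     if b is None:
--         return vals
--     low, high = b
--     if inclusive:
--         return tuple(v for v in vals if low <= v <= high)
--     return tuple(v for v in vals if low < v < high)
--
--
-- def grid_adjs(coord, bounds=None, inclusive=True):
--     bs = tuple(bounds) if bounds is not None else ()
--     per_dim = [
--         _dim_vals(c, bs[i] if i < len(bs) else None, inclusive)
--         for i, c in enumerate(coord)
--     ]
--     center = tuple(coord)
--     for t in it.product(*per_dim):
--         if t != center:
--             yield t
-- ===== Notes on version B (the rewrite author's own statement) =====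
-- stated objective: alternative
-- what changed: Instead of generating all 3^n delta tuples and testing each against the bounds, B filters the three candidate values of every dimension against its own bound once and takes the cartesian product of the filtered per-dimension lists, dropping only the centre tuple.
import Mathlib
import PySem

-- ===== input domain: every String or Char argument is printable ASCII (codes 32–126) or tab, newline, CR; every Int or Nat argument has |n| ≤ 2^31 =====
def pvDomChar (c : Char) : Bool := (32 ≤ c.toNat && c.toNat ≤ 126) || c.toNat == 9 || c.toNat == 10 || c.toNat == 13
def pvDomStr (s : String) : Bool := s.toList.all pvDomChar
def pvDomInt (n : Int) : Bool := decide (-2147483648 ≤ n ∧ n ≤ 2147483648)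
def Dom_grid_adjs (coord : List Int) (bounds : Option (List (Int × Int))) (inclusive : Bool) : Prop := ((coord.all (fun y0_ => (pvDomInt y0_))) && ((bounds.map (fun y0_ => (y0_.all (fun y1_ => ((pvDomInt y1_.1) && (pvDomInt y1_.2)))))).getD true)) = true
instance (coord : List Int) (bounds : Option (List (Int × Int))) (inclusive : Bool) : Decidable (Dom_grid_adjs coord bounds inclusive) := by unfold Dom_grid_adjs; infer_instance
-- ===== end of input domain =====

-- B replaces A's filter-over-the-full-3^n-delta-product by per-dimension bound filtering
-- before taking the cartesian product (objective: alternative decomposition; same output order).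

-- ===== PORT A =====

-- it.product((-1,0,1), repeat=n): first component varies slowest, exactly itertools order
def pvDeltaProd : Nat → List (List Int)
  | 0 => [[]]
  | n + 1 => [(-1 : Int), 0, 1].flatMap (fun d => (pvDeltaProd n).map (fun t => d :: t))

-- A's inner bounds loop over enumerate(zip(delta, bounds)) with break; i tracks the index.
-- coord[i] is ported as coord.getD i 0: in every call i < coord.length (the zip with delta
-- has at most coord.length entries), so this is exact for Python's coord[i].
def pvCheckBounds (coord : List Int) (inclusive : Bool) : Nat → List (Int × (Int × Int)) → Bool
  | _, [] => true
  | i, (d, (low, high)) :: rest =>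
    let v := coord.getD i 0 + d
    if inclusive then
      if low ≤ v ∧ v ≤ high then pvCheckBounds coord inclusive (i + 1) rest else false
    else
      if low < v ∧ v < high then pvCheckBounds coord inclusive (i + 1) rest else false

def grid_adjs (coord : List Int) (bounds : Option (List (Int × Int))) (inclusive : Bool) : List (List Int) :=
  (pvDeltaProd coord.length).foldl
    (fun acc delta =>
      if delta.all (fun d => d == 0) then acc
      else
        match bounds with
        | none => acc ++ [(coord.zip delta).map (fun p => p.1 + p.2)]
        | some bs =>
          if pvCheckBounds coord inclusive 0 (delta.zip bs) then
            acc ++ [(coord.zip delta).map (fun p => p.1 + p.2)]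
          else acc)
    []

-- ===== PORT B =====

-- _dim_vals: the three candidate values for one dimension, bound-filtered
def pvDimVals (c : Int) (b : Option (Int × Int)) (inclusive : Bool) : List Int :=
  match b with
  | none => [c - 1, c, c + 1]
  | some (low, high) =>
    if inclusive then [c - 1, c, c + 1].filter (fun v => decide (low ≤ v ∧ v ≤ high))
    else [c - 1, c, c + 1].filter (fun v => decide (low < v ∧ v < high))

-- per_dim list: bs[i] if i < len(bs) else None, built by walking coord and bs together
def pvPerDim (inclusive : Bool) : List Int → List (Int × Int) → List (List Int)
  | [], _ => []
  | c :: cs, [] => pvDimVals c none inclusive :: pvPerDim inclusive cs []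
  | c :: cs, b :: bs => pvDimVals c (some b) inclusive :: pvPerDim inclusive cs bs

-- it.product(*per_dim)
def pvCart : List (List Int) → List (List Int)
  | [] => [[]]
  | xs :: rest => xs.flatMap (fun x => (pvCart rest).map (fun t => x :: t))

def grid_adjs_alt (coord : List Int) (bounds : Option (List (Int × Int))) (inclusive : Bool) : List (List Int) :=
  (pvCart (pvPerDim inclusive coord (bounds.getD []))).filter (fun t => decide (t ≠ coord))

-- ===== PRECONDITION & SPEC =====
def Spec_grid_adjs (coord : List Int) (bounds : Option (List (Int × Int))) (inclusive : Bool) (out : List (List Int)) : Prop := out = grid_adjs_alt coord bounds inclusive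
instance (coord : List Int) (bounds : Option (List (Int × Int))) (inclusive : Bool) (out : List (List Int)) : Decidable (Spec_grid_adjs coord bounds inclusive out) := by unfold Spec_grid_adjs; infer_instance

-- ===== CLAIM (what is proved, stated in full; the proofs are below) =====
def Claim_equal_grid_adjs : Prop := ∀ (coord : List Int) (bounds : Option (List (Int × Int))) (inclusive : Bool), Dom_grid_adjs coord bounds inclusive → Spec_grid_adjs coord bounds inclusive (grid_adjs coord bounds inclusive)

-- ===== LEMMAS AND PROOFS =====

-- proof-side helpers: the per-position bound test, and the whole-delta test against a bounds list
def okA (incl : Bool) (low high v : Int) : Bool :=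
  if incl then decide (low ≤ v ∧ v ≤ high) else decide (low < v ∧ v < high)

def okOb (incl : Bool) (ob : Option (Int × Int)) (v : Int) : Bool :=
  match ob with
  | none => true
  | some (low, high) => okA incl low high v

def okZ (incl : Bool) : List Int → List Int → List (Int × Int) → Bool
  | _, [], _ => true
  | _, _ :: _, [] => true
  | cs, d :: ds, b :: bs => okA incl b.1 b.2 (cs.headD 0 + d) && okZ incl cs.tail ds bs

def zipAdd (coord δ : List Int) : List Int := (coord.zip δ).map (fun p => p.1 + p.2)

theorem deltaProd_length : ∀ (n : Nat) (δ : List Int), δ ∈ pvDeltaProd n → δ.length = n := by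
  intro n
  induction n with
  | zero => intro δ h; simp [pvDeltaProd] at h; simp [h]
  | succ n ih =>
    intro δ h
    simp only [pvDeltaProd, List.mem_flatMap, List.mem_map] at h
    obtain ⟨d, _, t, ht, rfl⟩ := h
    simp [ih t ht]

theorem okZ_nil (incl : Bool) (cs ds : List Int) : okZ incl cs ds [] = true := by
  cases ds <;> simp [okZ]

theorem checkBounds_eq (incl : Bool) (coord : List Int) :
    ∀ (ds : List Int) (bs : List (Int × Int)) (i : Nat),
      pvCheckBounds coord incl i (ds.zip bs) = okZ incl (coord.drop i) ds bs := by
  intro ds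
  induction ds with
  | nil => intro bs i; cases bs <;> simp [pvCheckBounds, okZ]
  | cons d ds ih =>
    intro bs i
    cases bs with
    | nil => simp [pvCheckBounds, okZ]
    | cons b bs =>
      have hhead : (coord.drop i).headD 0 = coord.getD i 0 := by
        simp [List.headD_eq_head?_getD, List.head?_drop, List.getD_eq_getElem?_getD]
      have htail : (coord.drop i).tail = coord.drop (i + 1) := by
        rw [List.tail_drop]
      obtain ⟨low, high⟩ := b
      simp only [List.zip_cons_cons, pvCheckBounds, okZ, hhead, htail, ih bs (i + 1)]
      cases incl <;> simp [okA]

-- A's foldl is a filter-then-map (one lemma per shape of the bounds argument)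
theorem foldl_none (coord : List Int) :
    ∀ (l : List (List Int)) (acc : List (List Int)),
      l.foldl (fun acc δ => if δ.all (fun d => d == 0) then acc
        else acc ++ [(coord.zip δ).map (fun p => p.1 + p.2)]) acc
        = acc ++ (l.filter (fun δ => !δ.all (fun d => d == 0))).map (zipAdd coord) := by
  intro l
  induction l with
  | nil => intro acc; simp
  | cons x l ih =>
    intro acc
    simp only [List.foldl_cons, List.filter_cons]
    by_cases hp : x.all (fun d => d == 0) = true
    · rw [if_pos hp, ih, if_neg (by simp [hp])]
    · rw [if_neg hp, ih, if_pos (by simp at hp ⊢; exact hp)]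
      simp only [List.map_cons, zipAdd, List.append_assoc, List.singleton_append]

theorem foldl_some (coord : List Int) (bs : List (Int × Int)) (incl : Bool) :
    ∀ (l : List (List Int)) (acc : List (List Int)),
      l.foldl (fun acc δ => if δ.all (fun d => d == 0) then acc
        else if pvCheckBounds coord incl 0 (δ.zip bs) then
          acc ++ [(coord.zip δ).map (fun p => p.1 + p.2)] else acc) acc
        = acc ++ (l.filter (fun δ =>
            !δ.all (fun d => d == 0) && pvCheckBounds coord incl 0 (δ.zip bs))).map (zipAdd coord) := by
  intro l
  induction l with
  | nil => intro acc; simp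
  | cons x l ih =>
    intro acc
    simp only [List.foldl_cons, List.filter_cons]
    by_cases hp : x.all (fun d => d == 0) = true
    · rw [if_pos hp, ih, if_neg (by simp [hp])]
    · by_cases hq : pvCheckBounds coord incl 0 (x.zip bs) = true
      · rw [if_neg hp, if_pos hq, ih, if_pos (by simp at hp ⊢; simp [hp, hq])]
        simp only [List.map_cons, zipAdd, List.append_assoc, List.singleton_append]
      · rw [if_neg hp, if_neg hq, ih, if_neg (by simp at hq ⊢; simp [hq])]

theorem A_char_none (coord : List Int) (incl : Bool) :
    grid_adjs coord none incl
      = (pvDeltaProd coord.length).foldl (fun acc δ => if δ.all (fun d => d == 0) then acc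
        else acc ++ [(coord.zip δ).map (fun p => p.1 + p.2)]) [] := rfl

theorem A_char_some (coord : List Int) (bs : List (Int × Int)) (incl : Bool) :
    grid_adjs coord (some bs) incl
      = (pvDeltaProd coord.length).foldl (fun acc δ => if δ.all (fun d => d == 0) then acc
        else if pvCheckBounds coord incl 0 (δ.zip bs) then
          acc ++ [(coord.zip δ).map (fun p => p.1 + p.2)] else acc) [] := rfl

theorem A_char (coord : List Int) (bounds : Option (List (Int × Int))) (incl : Bool) :
    grid_adjs coord bounds incl
      = ((pvDeltaProd coord.length).filter
          (fun δ => !δ.all (fun d => d == 0) && okZ incl coord δ (bounds.getD []))).map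
          (zipAdd coord) := by
  cases bounds with
  | none =>
    rw [A_char_none, foldl_none]
    simp only [List.nil_append, Option.getD_none]
    congr 1
    apply List.filter_congr
    intro δ _
    simp [okZ_nil]
  | some bs =>
    rw [A_char_some, foldl_some]
    simp only [List.nil_append, Option.getD_some]
    congr 1
    apply List.filter_congr
    intro δ _
    rw [checkBounds_eq incl coord δ bs 0]
    simp

-- B's per-dimension values as a filterMap over the three deltas
theorem dimVals_eq (c : Int) (ob : Option (Int × Int)) (incl : Bool) :
    pvDimVals c ob incl
      = [(-1 : Int), 0, 1].filterMap
          (fun d => if okOb incl ob (c + d) then some (c + d) else none) := by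
  have e1 : c + (-1) = c - 1 := by ring
  have e2 : c + 0 = c := by ring
  cases ob with
  | none =>
    simp [pvDimVals, okOb, e1, e2]
  | some b =>
    obtain ⟨low, high⟩ := b
    cases incl <;>
      simp only [pvDimVals, okOb, okA, e1, e2, List.filterMap_cons, List.filterMap_nil,
        List.filter_cons, List.filter_nil, Bool.false_eq_true, if_false, if_true,
        decide_eq_true_eq] <;>
      split_ifs <;> simp_all

theorem flatMap_filterMap_if (g : Int → Bool) (c : Int) (h : Int → List (List Int)) (l : List Int) :
    (l.filterMap (fun d => if g (c + d) then some (c + d) else none)).flatMap h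
      = l.flatMap (fun d => if g (c + d) then h (c + d) else []) := by
  induction l with
  | nil => simp
  | cons d l ih =>
    simp only [List.filterMap_cons]
    by_cases hg : g (c + d) = true
    · simp [hg, List.flatMap_cons, ih]
    · simp only [Bool.not_eq_true] at hg
      simp [hg, ih]

theorem filter_map_flatMap (P : List Int → Bool) (F : List Int → List Int)
    (l : List Int) (f : Int → List (List Int)) :
    ((l.flatMap f).filter P).map F = l.flatMap (fun d => ((f d).filter P).map F) := by
  induction l with
  | nil => simp
  | cons d l ih => simp [List.filter_append, ih]

theorem filter_and_const (a : Bool) (q : List Int → Bool) (l : List (List Int)) :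
    l.filter (fun δ => a && q δ) = if a then l.filter q else [] := by
  cases a <;> simp

theorem B_char (incl : Bool) :
    ∀ (coord : List Int) (bsl : List (Int × Int)),
      pvCart (pvPerDim incl coord bsl)
        = ((pvDeltaProd coord.length).filter (fun δ => okZ incl coord δ bsl)).map (zipAdd coord) := by
  intro coord
  induction coord with
  | nil =>
    intro bsl
    simp [pvPerDim, pvCart, pvDeltaProd, okZ, zipAdd, List.filter]
  | cons c cs ih =>
    have main : ∀ (ob : Option (Int × Int)) (tl bsl : List (Int × Int)),
        pvPerDim incl (c :: cs) bsl = pvDimVals c ob incl :: pvPerDim incl cs tl →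
        (∀ (d : Int) (δ : List Int),
            okZ incl (c :: cs) (d :: δ) bsl = (okOb incl ob (c + d) && okZ incl cs δ tl)) →
        pvCart (pvPerDim incl (c :: cs) bsl)
          = ((pvDeltaProd (c :: cs).length).filter (fun δ => okZ incl (c :: cs) δ bsl)).map
              (zipAdd (c :: cs)) := by
      intro ob tl bsl hper hok
      rw [hper]
      show (pvDimVals c ob incl).flatMap (fun x => (pvCart (pvPerDim incl cs tl)).map (fun t => x :: t)) = _
      rw [dimVals_eq, ih tl,
        flatMap_filterMap_if (okOb incl ob) c
          (fun v => (((pvDeltaProd cs.length).filter (fun δ => okZ incl cs δ tl)).map (zipAdd cs)).map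
            (fun t => v :: t))]
      show _ = ((pvDeltaProd (cs.length + 1)).filter (fun δ => okZ incl (c :: cs) δ bsl)).map (zipAdd (c :: cs))
      rw [show pvDeltaProd (cs.length + 1)
          = [(-1 : Int), 0, 1].flatMap (fun d => (pvDeltaProd cs.length).map (fun t => d :: t)) from rfl]
      rw [filter_map_flatMap]
      congr 1
      funext d
      rw [List.filter_map, List.map_map]
      have hcomp : ((fun δ => okZ incl (c :: cs) δ bsl) ∘ (fun t => d :: t))
          = fun δ => okOb incl ob (c + d) && okZ incl cs δ tl := by
        funext δ; simp [Function.comp, hok]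
      rw [hcomp, filter_and_const]
      by_cases hg : okOb incl ob (c + d) = true
      · simp [hg, List.map_map, Function.comp, zipAdd]
      · simp only [Bool.not_eq_true] at hg
        simp [hg]
    intro bsl
    cases bsl with
    | nil =>
      apply main none []
      · rfl
      · intro d δ; simp [okZ, okOb, okZ_nil]
    | cons b bs =>
      apply main (some b) bs
      · rfl
      · intro d δ; simp [okZ, okOb]

theorem zipAdd_eq_self (δ coord : List Int) (h : δ.length = coord.length) :
    (zipAdd coord δ = coord ↔ δ.all (fun d => d == 0) = true) := by
  induction coord generalizing δ with
  | nil => cases δ with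
    | nil => simp [zipAdd]
    | cons d ds => simp at h
  | cons c cs ih =>
    cases δ with
    | nil => simp at h
    | cons d ds =>
      simp only [List.length_cons, Nat.succ.injEq] at h
      simp only [zipAdd, List.zip_cons_cons, List.map_cons, List.cons.injEq, List.all_cons,
        Bool.and_eq_true, beq_iff_eq]
      rw [← ih ds h]
      constructor
      · rintro ⟨h1, h2⟩; exact ⟨by omega, h2⟩
      · rintro ⟨h1, h2⟩; exact ⟨by omega, h2⟩

-- ===== VERDICT (by name: the statement is the Claim_ definition above) =====
theorem grid_adjs_spec : Claim_equal_grid_adjs := by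
  intro coord bounds incl _
  unfold Spec_grid_adjs grid_adjs_alt
  rw [A_char, B_char incl coord (bounds.getD []), List.filter_map, List.filter_filter]
  congr 1
  apply List.filter_congr
  intro δ hδ
  have hlen : δ.length = coord.length := deltaProd_length _ _ hδ
  have hz := zipAdd_eq_self δ coord hlen
  by_cases hp : δ.all (fun d => d == 0) = true
  · have : zipAdd coord δ = coord := hz.mpr hp
    simp [Function.comp, hp, this]
  · simp only [Bool.not_eq_true] at hp
    have : zipAdd coord δ ≠ coord := by
      intro hc; rw [hz.mp hc] at hp; simp at hp
    simp [Function.comp, hp, this]
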